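-- pv_equiv track=rewrite | github.com/hyuntae99/Algorithm | Python3/프로그래머스/1/258712. 가장 많이 받은 선물/가장 많이 받은 선물.py | solution
-- ===== SOURCE A (Python) =====
-- def solution(friends, gifts):
--     n = len(friends)
--     # 사람에게 고유 번호 할당
--     people = {friend : i for i, friend in enumerate(friends)}
--
--     # 이차원 배열 생성
--     presents = [[0 for _ in range(n)] for _ in range(n)]
--
--     for gift in gifts:
--         sender, receiver = gift.split(' ')
--         # 이차원 배열에 누가 누구에게 줬는지 카운트
--         presents[people[sender]][people[receiver]] += 1
--
--     scores = [] # 선물 지수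
--     for i in range(n):
--         send = sum(presents[i]) # 준 선물
--         receive = 0 # 받은 선물
--         for j in range(n):
--             receive += presents[j][i]
--         scores.append(send - receive) # 선물 지수 계산
--
--     max = 0 # 최댓값
--     for i in range(n):
--         count = 0 # 받을 선물 수
--         for j in range(n):
--             if i == j:
--                 continue
--             # 내가 준 선물이 더 크다.
--             if presents[i][j] > presents[j][i]:
--                 count += 1
--             # 선물 수가 같거나 기록이 없다.
--             elif presents[i][j] == presents[j][i]:
--                 # 선물 지수가 크다.
--                 if scores[i] > scores[j]:
--                     count += 1
--         # 최댓값 최신화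
--         if max < count:
--             max = count
--
--     return max
-- ===== SOURCE B (Python) =====
-- def solution(friends, gifts):
--     n = len(friends)
--     idx = {f: k for k, f in enumerate(friends)}
--     pairs = {}
--     score = [0] * n
--     for g in gifts:
--         a, b = g.split(' ')
--         i, j = idx[a], idx[b]
--         pairs[(i, j)] = pairs.get((i, j), 0) + 1
--         score[i] += 1
--         score[j] -= 1
--     # baseline: as if every pair tied on gift counts, wins come from score comparisons
--     count = [sum(s < score[i] for s in score) for i in range(n)]
--     # correct only the unordered pairs whose gift counts actually differ:
--     # the winner's key carries the larger count, so each such pair is seen exactly once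
--     for (i, j), ij in pairs.items():
--         ji = pairs.get((j, i), 0)
--         if ij > ji:
--             count[i] += 1 - (score[i] > score[j])
--             count[j] -= score[j] > score[i]
--     return max(count, default=0)
-- ===== Notes on version B (the rewrite author's own statement) =====
-- stated objective: alternative
-- what changed: Instead of A's dense n×n matrix and ordered-pairwise gift-count comparison loop, B folds gifts once into a sparse (sender,receiver)->count dict plus net scores, takes a score-rank baseline count[i] = #{j : score[j] < score[i]} (as if every pair tied), and then corrects only at the dict's keys: for each unordered pair whose gift counts differ, the winner gains 1-(score wins already counted) and the loser loses its baseline score win.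
import Mathlib
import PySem

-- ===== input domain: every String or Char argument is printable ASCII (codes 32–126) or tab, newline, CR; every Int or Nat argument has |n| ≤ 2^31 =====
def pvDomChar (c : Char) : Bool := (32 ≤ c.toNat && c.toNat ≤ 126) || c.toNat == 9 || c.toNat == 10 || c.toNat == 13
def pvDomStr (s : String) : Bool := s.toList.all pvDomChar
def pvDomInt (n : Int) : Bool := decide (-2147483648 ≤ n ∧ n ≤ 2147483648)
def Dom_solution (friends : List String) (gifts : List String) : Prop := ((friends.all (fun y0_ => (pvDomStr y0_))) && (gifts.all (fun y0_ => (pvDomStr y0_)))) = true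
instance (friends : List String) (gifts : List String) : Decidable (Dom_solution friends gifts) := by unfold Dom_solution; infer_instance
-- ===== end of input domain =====

-- B replaces A's dense n×n matrix and ordered-pairwise gift-count comparison with a
-- sparse (sender,receiver)→count dict + net scores built in one pass, a score-rank
-- baseline count, and corrections only at the dict's keys (objective: alternative).

-- ===== PORT A =====
-- people = {friend : i for i, friend in enumerate(friends)}
def pvPeople (friends : List String) : PySem.Dict String Int :=
  (PySem.List.enumerate friends).foldl (fun d p => d.insert p.2 p.1) PySem.Dict.empty

-- loop body of A's 'for gift in gifts'.  'sender, receiver = gift.split(' ')' and the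
-- dict lookups are taken with defaults ('parts.getD', 'people.getD'): exact under
-- Pre_solution, which admits exactly the gifts on which Python does not raise here.
def pvStepA (people : PySem.Dict String Int) (M : List (List Int)) (gift : String) :
    List (List Int) :=
  let parts := ((PySem.Str.split? gift " ").getD [])
  let i := people.getD (parts.getD 0 "") 0
  let j := people.getD (parts.getD 1 "") 0
  let row := PySem.List.pyGetD M i []
  PySem.List.pySetD M i (PySem.List.pySetD row j (PySem.List.pyGetD row j 0 + 1))

-- transliteration of A; indices produced by 'range(n)' are Nat < n = length, so the
-- in-range accesses presents[i], presents[j][i], scores[i] are ported as plain .getD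
def solution (friends : List String) (gifts : List String) : Int :=
  let n := friends.length
  let people := pvPeople friends
  let presents := gifts.foldl (pvStepA people)
      ((List.range n).map (fun _ => (List.range n).map (fun _ => (0 : Int))))
  let scores := (List.range n).foldl (fun sc i =>
      let send := (presents.getD i []).sum
      let receive := (List.range n).foldl
          (fun a j => a + (presents.getD j []).getD i 0) 0
      sc ++ [send - receive]) []
  (List.range n).foldl (fun mx i =>
      let count := (List.range n).foldl (fun c j =>
          if i = j then c
          else if (presents.getD i []).getD j 0 > (presents.getD j []).getD i 0 then c + 1
          else if (presents.getD i []).getD j 0 = (presents.getD j []).getD i 0 then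
            if scores.getD i 0 > scores.getD j 0 then c + 1 else c
          else c) 0
      if mx < count then count else mx) 0

-- ===== PORT B =====
-- loop body of B's single pass: sparse pair counter + net score per person
-- (same defaulted lookups as A's step: exact under Pre_solution)
def pvStepB (idx : PySem.Dict String Int)
    (st : PySem.Dict (Int × Int) Int × List Int) (g : String) :
    PySem.Dict (Int × Int) Int × List Int :=
  let parts := ((PySem.Str.split? g " ").getD [])
  let i := idx.getD (parts.getD 0 "") 0
  let j := idx.getD (parts.getD 1 "") 0
  let sc1 := PySem.List.pySetD st.2 i (PySem.List.pyGetD st.2 i 0 + 1)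
  (st.1.insert (i, j) (st.1.getD (i, j) 0 + 1),
   PySem.List.pySetD sc1 j (PySem.List.pyGetD sc1 j 0 - 1))

-- body of B's correction loop over pairs.items(): the winner of an unordered pair
-- gains 1 minus its baseline score win, the loser loses its baseline score win
def pvCorr (pr : PySem.Dict (Int × Int) Int) (score : List Int)
    (cnt : List Int) (it : (Int × Int) × Int) : List Int :=
  let ji := pr.getD (it.1.2, it.1.1) 0
  if it.2 > ji then
    let c1 := PySem.List.pySetD cnt it.1.1 (PySem.List.pyGetD cnt it.1.1 0 +
        (1 - (if PySem.List.pyGetD score it.1.1 0 > PySem.List.pyGetD score it.1.2 0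
              then (1 : Int) else 0)))
    PySem.List.pySetD c1 it.1.2 (PySem.List.pyGetD c1 it.1.2 0 -
        (if PySem.List.pyGetD score it.1.2 0 > PySem.List.pyGetD score it.1.1 0
         then (1 : Int) else 0))
  else cnt

def solution_alt (friends : List String) (gifts : List String) : Int :=
  let n := friends.length
  let idx := pvPeople friends
  let st := gifts.foldl (pvStepB idx) (PySem.Dict.empty, List.replicate n (0 : Int))
  let count := (List.range n).map (fun i =>
      (st.2.map (fun s => if s < st.2.getD i 0 then (1 : Int) else 0)).sum)
  let count' := st.1.items.foldl (pvCorr st.1 st.2) count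
  match PySem.List.max? count' (fun x => x) with
  | some m => m
  | none => 0

-- ===== PRECONDITION & SPEC =====
-- Pre_ admits exactly the inputs where A returns: every gift splits on ' ' into exactly
-- two names, both present in friends (otherwise Python raises ValueError / KeyError).
def Pre_solution (friends : List String) (gifts : List String) : Prop :=
  ∀ g ∈ gifts, (((PySem.Str.split? g " ").getD [])).length = 2 ∧
    ∀ p ∈ ((PySem.Str.split? g " ").getD []), p ∈ friends
instance (friends : List String) (gifts : List String) : Decidable (Pre_solution friends gifts) := by
  unfold Pre_solution; infer_instance
def pvWitness_solution : List String × List String := (["a", "b"], ["a b", "b a", "a b"])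

def Spec_solution (friends : List String) (gifts : List String) (out : Int) : Prop := out = solution_alt friends gifts
instance (friends : List String) (gifts : List String) (out : Int) : Decidable (Spec_solution friends gifts out) := by unfold Spec_solution; infer_instance

-- ===== CLAIM (what is proved, stated in full; the proofs are below) =====
def Claim_equal_solution : Prop := ∀ (friends : List String) (gifts : List String), Dom_solution friends gifts → Pre_solution friends gifts → Spec_solution friends gifts (solution friends gifts)

-- ===== LEMMAS AND PROOFS =====

-- ===== LEMMAS AND PROOFS =====

-- getD after set (in-range index)
theorem pv_getD_set {α : Type} (xs : List α) (i k : Nat) (v d : α) (hi : i < xs.length) :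
    (xs.set i v).getD k d = if k = i then v else xs.getD k d := by
  by_cases h : k = i
  · subst h; simp [List.getD, List.getElem?_set_self hi]
  · simp [List.getD, List.getElem?_set_ne (fun he => h he.symm), h]

-- bumping one in-range entry bumps the sum by one
theorem pv_sum_set_add_one (xs : List Int) (j : Nat) (hj : j < xs.length) :
    (xs.set j (xs.getD j 0 + 1)).sum = xs.sum + 1 := by
  rw [List.sum_set, List.getD_eq_getElem xs 0 hj]
  have h1 := List.sum_take_add_sum_drop xs j
  rw [List.drop_eq_getElem_cons hj] at h1
  simp only [List.sum_cons] at h1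
  simp only [hj, if_pos]
  omega

-- any value stored in the fold-built dict comes from the pair list (or the start dict)
theorem pv_fold_get?_mem (l : List (Int × String)) :
    ∀ (d : PySem.Dict String Int) (s : String) (v : Int),
      (l.foldl (fun d p => d.insert p.2 p.1) d).get? s = some v →
      v ∈ l.map (·.1) ∨ d.get? s = some v := by
  induction l with
  | nil => intro d s v h; exact Or.inr h
  | cons p t ih =>
    intro d s v h
    simp only [List.foldl_cons] at h
    rcases ih _ _ _ h with h1 | h2
    · exact Or.inl (by simpa using Or.inr h1)
    · rw [PySem.Dict.get?_insert] at h2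
      by_cases hs : s = p.2
      · rw [if_pos hs] at h2
        exact Or.inl (by simp [Option.some_inj.mp h2.symm])
      · rw [if_neg hs] at h2
        exact Or.inr h2

-- a key listed in the pairs (or already present) is present after the fold
theorem pv_fold_get?_isSome (l : List (Int × String)) :
    ∀ (d : PySem.Dict String Int) (s : String),
      (s ∈ l.map (·.2) ∨ (d.get? s).isSome) →
      ((l.foldl (fun d p => d.insert p.2 p.1) d).get? s).isSome := by
  induction l with
  | nil =>
    intro d s h
    simp only [List.foldl_nil]
    rcases h with h | h
    · simp at h
    · exact h
  | cons p t ih =>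
    intro d s h
    simp only [List.foldl_cons]
    apply ih
    by_cases ht : s ∈ t.map (·.2)
    · exact Or.inl ht
    · right
      rcases h with h | h
      · simp only [List.map_cons, List.mem_cons] at h
        rcases h with h | h
        · rw [h, PySem.Dict.get?_insert_self]; rfl
        · exact absurd h ht
      · rw [PySem.Dict.get?_insert]
        by_cases hs : s = p.2
        · rw [if_pos hs]; rfl
        · rwa [if_neg hs]

-- every friend gets an index in [0, n) from the dict comprehension
theorem pv_people_getD (friends : List String) (s : String) (hs : s ∈ friends) :
    ∃ k : Nat, k < friends.length ∧ (pvPeople friends).getD s 0 = (k : Int) := by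
  have hmem : s ∈ (PySem.List.enumerate friends 0).map (·.2) := by
    rw [PySem.List.map_snd_enumerate]; exact hs
  have hsome := pv_fold_get?_isSome (PySem.List.enumerate friends 0) PySem.Dict.empty s (Or.inl hmem)
  obtain ⟨v, hv⟩ := Option.isSome_iff_exists.mp hsome
  have hrange : v ∈ (PySem.List.enumerate friends 0).map (·.1) := by
    rcases pv_fold_get?_mem (PySem.List.enumerate friends 0) PySem.Dict.empty s v hv with h | h
    · exact h
    · rw [PySem.Dict.get?_empty] at h; cases h
  rw [PySem.List.map_fst_enumerate] at hrange
  rw [PySem.List.mem_pyRange_one] at hrange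
  refine ⟨v.toNat, by omega, ?_⟩
  unfold pvPeople
  rw [PySem.Dict.getD_eq_get?_getD, hv]
  simp [Int.toNat_of_nonneg hrange.1]

-- the coupling invariant between A's dense matrix and B's sparse state
def pvInv (n : Nat) (M : List (List Int)) (pr : PySem.Dict (Int × Int) Int)
    (sc : List Int) : Prop :=
  M.length = n ∧ (∀ k : Nat, k < n → (M.getD k []).length = n) ∧ sc.length = n ∧
  (∀ i j : Nat, i < n → j < n →
      (M.getD i []).getD j 0 = pr.getD ((i : Int), (j : Int)) 0) ∧
  (∀ i j : Nat, i < n → j < n → 0 ≤ (M.getD i []).getD j 0) ∧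
  (∀ i : Nat, i < n → sc.getD i 0 =
      (M.getD i []).sum -
        (List.range n).foldl (fun a j => a + (M.getD j []).getD i 0) 0) ∧
  (∀ key ∈ pr.keys, ∃ a b : Nat, a < n ∧ b < n ∧ key = ((a : Int), (b : Int))) ∧
  (∀ i j : Nat, i < n → j < n → (M.getD i []).getD j 0 ≠ 0 →
      ((i : Int), (j : Int)) ∈ pr.keys) ∧
  pr.keys.Nodup

theorem pv_getD_zero_row (n : Nat) (j : Nat) :
    ((List.range n).map (fun _ => (0 : Int))).getD j 0 = 0 := by
  by_cases hj : j < n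
  · rw [List.getD_eq_getElem _ _ (by simpa using hj)]; simp
  · rw [List.getD_eq_default]; simpa using hj

theorem pvInv_init (n : Nat) :
    pvInv n ((List.range n).map fun _ => (List.range n).map fun _ => (0 : Int))
      PySem.Dict.empty (List.replicate n 0) := by
  have hrow : ∀ k : Nat, k < n →
      (((List.range n).map fun _ => (List.range n).map fun _ => (0 : Int)).getD k []) =
        (List.range n).map fun _ => (0 : Int) := by
    intro k hk
    rw [List.getD_eq_getElem _ _ (by simpa using hk)]; simp
  refine ⟨by simp, ?_, by simp, ?_, ?_, ?_, ?_, ?_, ?_⟩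
  · intro k hk; rw [hrow k hk]; simp
  · intro i j hi hj
    rw [hrow i hi, PySem.Dict.getD_empty, pv_getD_zero_row]
  · intro i j hi hj
    rw [hrow i hi, pv_getD_zero_row]
  · intro i hi
    rw [List.getD_replicate _ hi]
    have h1 : (((List.range n).map fun _ => (List.range n).map fun _ => (0 : Int)).getD i []).sum = 0 := by
      rw [hrow i hi]; exact List.sum_eq_zero (by simp)
    have h2 : (List.range n).foldl
        (fun a j => a + (((List.range n).map fun _ => (List.range n).map fun _ => (0 : Int)).getD j []).getD i 0) 0 = 0 := by
      rw [PySem.List.foldl_add]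
      rw [List.sum_eq_zero]
      · simp
      · intro x hx
        obtain ⟨j, hj, rfl⟩ := List.mem_map.mp hx
        rw [hrow j (List.mem_range.mp hj), pv_getD_zero_row]
    rw [h1, h2]; omega
  · intro key hkey
    simp [PySem.Dict.keys_empty] at hkey
  · intro i j hi hj h
    rw [hrow i hi, pv_getD_zero_row] at h
    exact absurd rfl h
  · simp [PySem.Dict.keys_empty]

-- one gift at indices (iN, jN) preserves the invariant
theorem pvInv_update (n : Nat) (M : List (List Int)) (pr : PySem.Dict (Int × Int) Int)
    (sc : List Int) (h : pvInv n M pr sc)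
    (iN jN : Nat) (hiN : iN < n) (hjN : jN < n) :
    pvInv n
      (PySem.List.pySetD M (iN : Int)
        (PySem.List.pySetD (PySem.List.pyGetD M (iN : Int) []) (jN : Int)
          (PySem.List.pyGetD (PySem.List.pyGetD M (iN : Int) []) (jN : Int) 0 + 1)))
      (pr.insert ((iN : Int), (jN : Int)) (pr.getD ((iN : Int), (jN : Int)) 0 + 1))
      (PySem.List.pySetD
        (PySem.List.pySetD sc (iN : Int) (PySem.List.pyGetD sc (iN : Int) 0 + 1)) (jN : Int)
        (PySem.List.pyGetD
          (PySem.List.pySetD sc (iN : Int) (PySem.List.pyGetD sc (iN : Int) 0 + 1)) (jN : Int) 0 - 1)) := by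
  obtain ⟨hlen, hrlen, hslen, hpair, hnn, hsc, hkeys, hcompl, hnd⟩ := h
  simp only [PySem.List.pySetD_natCast, PySem.List.pyGetD_natCast]
  have hiM : iN < M.length := by omega
  have hrowlen : (M.getD iN []).length = n := hrlen iN hiN
  have hgrow : ∀ k : Nat, (M.set iN ((M.getD iN []).set jN ((M.getD iN []).getD jN 0 + 1))).getD k [] =
      if k = iN then (M.getD iN []).set jN ((M.getD iN []).getD jN 0 + 1) else M.getD k [] :=
    fun k => pv_getD_set M iN k _ [] hiM
  have hentry : ∀ i j : Nat, i < n → j < n →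
      ((M.set iN ((M.getD iN []).set jN ((M.getD iN []).getD jN 0 + 1))).getD i []).getD j 0 =
        (M.getD i []).getD j 0 + (if i = iN ∧ j = jN then 1 else 0) := by
    intro i j hi hj
    rw [hgrow i]
    by_cases hii : i = iN
    · subst hii
      rw [if_pos rfl, pv_getD_set _ jN j _ 0 (by omega)]
      by_cases hjj : j = jN
      · subst hjj; simp
      · simp [hjj]
    · simp [hii]
  have hrowsum : ∀ i : Nat, i < n →
      ((M.set iN ((M.getD iN []).set jN ((M.getD iN []).getD jN 0 + 1))).getD i []).sum =
        (M.getD i []).sum + (if i = iN then 1 else 0) := by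
    intro i hi
    rw [hgrow i]
    by_cases hii : i = iN
    · subst hii
      rw [if_pos rfl, if_pos rfl, pv_sum_set_add_one _ jN (by omega)]
    · simp [hii]
  have hcolsum : ∀ i : Nat, i < n →
      (List.range n).foldl
        (fun a j => a + ((M.set iN ((M.getD iN []).set jN ((M.getD iN []).getD jN 0 + 1))).getD j []).getD i 0) 0 =
      (List.range n).foldl (fun a j => a + (M.getD j []).getD i 0) 0 +
        (if i = jN then 1 else 0) := by
    intro i hi
    rw [PySem.List.foldl_add, PySem.List.foldl_add]
    have hstep : ∀ j ∈ List.range n,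
        ((M.set iN ((M.getD iN []).set jN ((M.getD iN []).getD jN 0 + 1))).getD j []).getD i 0 =
          (M.getD j []).getD i 0 + (if j = iN ∧ i = jN then 1 else 0) := by
      intro j hj
      exact hentry j i (List.mem_range.mp hj) hi
    rw [List.map_congr_left hstep, PySem.List.sum_map_add_int]
    have hone : (List.map (fun j => if j = iN ∧ i = jN then (1 : Int) else 0) (List.range n)).sum =
        if i = jN then 1 else 0 := by
      by_cases hij : i = jN
      · rw [if_pos hij]
        have : (fun j => if j = iN ∧ i = jN then (1 : Int) else 0) =
            (fun j => if (j == iN) = true then (1 : Int) else 0) := by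
          funext j; simp [hij]
        rw [this, PySem.List.sum_map_ite_one_zero]
        rw [show List.countP (fun j => j == iN) (List.range n) = (List.range n).count iN from rfl]
        rw [List.count_eq_one_of_mem List.nodup_range (List.mem_range.mpr hiN)]
        rfl
      · rw [if_neg hij, List.sum_eq_zero]
        intro x hx
        obtain ⟨j, hj, rfl⟩ := List.mem_map.mp hx
        simp [hij]
    rw [hone]
    omega
  refine ⟨by simpa using hlen, ?_, by simpa using hslen, ?_, ?_, ?_, ?_, ?_, ?_⟩
  · intro k hk
    rw [hgrow k]
    by_cases hki : k = iN
    · rw [if_pos hki]; simpa using hrowlen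
    · rw [if_neg hki]; exact hrlen k hk
  · -- pair counts
    intro i j hi hj
    rw [hentry i j hi hj, PySem.Dict.getD_insert]
    have hcast : (((i : Int), (j : Int)) = ((iN : Int), (jN : Int))) ↔ (i = iN ∧ j = jN) := by
      constructor
      · intro he
        injection he with h1 h2
        exact ⟨by exact_mod_cast h1, by exact_mod_cast h2⟩
      · rintro ⟨rfl, rfl⟩; rfl
    by_cases hb : i = iN ∧ j = jN
    · obtain ⟨rfl, rfl⟩ := hb
      rw [if_pos ⟨rfl, rfl⟩, if_pos (hcast.mpr ⟨rfl, rfl⟩), hpair i j hi hj]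
    · rw [if_neg hb, if_neg (fun he => hb (hcast.mp he)), hpair i j hi hj]
      omega
  · -- nonnegativity
    intro i j hi hj
    rw [hentry i j hi hj]
    have := hnn i j hi hj
    split_ifs <;> omega
  · -- scores
    intro i hi
    have hs1 : ∀ m : Nat, m < n → (sc.set iN (sc.getD iN 0 + 1)).getD m 0 =
        sc.getD m 0 + (if m = iN then 1 else 0) := by
      intro m hm
      rw [pv_getD_set sc iN m _ 0 (by omega)]
      split_ifs with h1
      · subst h1; omega
      · omega
    have hs2 : ((sc.set iN (sc.getD iN 0 + 1)).set jN
          ((sc.set iN (sc.getD iN 0 + 1)).getD jN 0 - 1)).getD i 0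
        = sc.getD i 0 + (if i = iN then 1 else 0) - (if i = jN then 1 else 0) := by
      rw [pv_getD_set _ jN i _ 0 (by rw [List.length_set]; omega), hs1 jN hjN]
      by_cases hij : i = jN
      · subst hij
        split_ifs <;> omega
      · rw [if_neg hij, hs1 i hi]
        split_ifs <;> omega
    rw [hs2, hrowsum i hi, hcolsum i hi, hsc i hi]
    split_ifs <;> omega
  · -- keys in range
    intro key hkey
    rw [PySem.Dict.mem_keys_insert] at hkey
    rcases hkey with h | h
    · exact ⟨iN, jN, hiN, hjN, h⟩
    · exact hkeys key h
  · -- completeness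
    intro i j hi hj hne
    rw [PySem.Dict.mem_keys_insert]
    rw [hentry i j hi hj] at hne
    by_cases hb : i = iN ∧ j = jN
    · exact Or.inl (by rw [hb.1, hb.2])
    · rw [if_neg hb, add_zero] at hne
      exact Or.inr (hcompl i j hi hj hne)
  · -- nodup keys
    exact PySem.Dict.nodup_keys_insert pr _ _ hnd

-- folding all gifts (with valid, in-range indices) preserves the invariant
theorem pvInv_fold (P : PySem.Dict String Int) (n : Nat) (gifts : List String) :
    ∀ (M : List (List Int)) (pr : PySem.Dict (Int × Int) Int) (sc : List Int),
      (∀ g ∈ gifts, ∃ iN jN : Nat, iN < n ∧ jN < n ∧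
          P.getD (((PySem.Str.split? g " ").getD []).getD 0 "") 0 = (iN : Int) ∧
          P.getD (((PySem.Str.split? g " ").getD []).getD 1 "") 0 = (jN : Int)) →
      pvInv n M pr sc →
      pvInv n (gifts.foldl (pvStepA P) M)
        (gifts.foldl (pvStepB P) (pr, sc)).1
        (gifts.foldl (pvStepB P) (pr, sc)).2 := by
  induction gifts with
  | nil => intro M pr sc _ h; exact h
  | cons g t ih =>
    intro M pr sc hvalid h
    obtain ⟨iN, jN, hiN, hjN, hgi, hgj⟩ := hvalid g (by simp)
    simp only [List.foldl_cons]
    have hstepB : pvStepB P (pr, sc) g =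
        (pr.insert ((iN : Int), (jN : Int)) (pr.getD ((iN : Int), (jN : Int)) 0 + 1),
         PySem.List.pySetD
           (PySem.List.pySetD sc (iN : Int) (PySem.List.pyGetD sc (iN : Int) 0 + 1)) (jN : Int)
           (PySem.List.pyGetD
             (PySem.List.pySetD sc (iN : Int) (PySem.List.pyGetD sc (iN : Int) 0 + 1)) (jN : Int) 0 - 1)) := by
      simp only [pvStepB, hgi, hgj]
    have hstepA : pvStepA P M g =
        PySem.List.pySetD M (iN : Int)
          (PySem.List.pySetD (PySem.List.pyGetD M (iN : Int) []) (jN : Int)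
            (PySem.List.pyGetD (PySem.List.pyGetD M (iN : Int) []) (jN : Int) 0 + 1)) := by
      simp only [pvStepA, hgi, hgj]
    rw [hstepA, hstepB]
    exact ih _ _ _ (fun g' hg' => hvalid g' (List.mem_cons_of_mem _ hg'))
      (pvInv_update n M pr sc h iN jN hiN hjN)

-- per-index delta of one step of B's correction loop (proof bookkeeping only)
def pvDelta (pr : PySem.Dict (Int × Int) Int) (sc : List Int) (k : Nat)
    (it : (Int × Int) × Int) : Int :=
  if it.2 > pr.getD (it.1.2, it.1.1) 0 then
    (if it.1.1 = (k : Int) then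
       1 - (if PySem.List.pyGetD sc it.1.1 0 > PySem.List.pyGetD sc it.1.2 0
            then (1 : Int) else 0) else 0)
    - (if it.1.2 = (k : Int) then
       (if PySem.List.pyGetD sc it.1.2 0 > PySem.List.pyGetD sc it.1.1 0
        then (1 : Int) else 0) else 0)
  else 0

-- the same delta as a function of the key only (items carry their stored value)
def pvG (pr : PySem.Dict (Int × Int) Int) (sc : List Int) (k : Nat)
    (key : Int × Int) : Int :=
  pvDelta pr sc k (key, pr.getD key 0)

-- A's inner comparison term
def pvFA (M : List (List Int)) (scores : List Int) (i j : Nat) : Int :=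
  if i = j then 0
  else if (M.getD i []).getD j 0 > (M.getD j []).getD i 0 then 1
  else if (M.getD i []).getD j 0 = (M.getD j []).getD i 0 then
    (if scores.getD i 0 > scores.getD j 0 then 1 else 0)
  else 0

theorem pv_list_sum_range (n : Nat) (f : Nat → Int) :
    ((List.range n).map f).sum = ∑ x ∈ Finset.range n, f x := by
  rw [← List.sum_toFinset f List.nodup_range, List.toFinset_range]

theorem pv_map_sum_getD (l : List Int) (f : Int → Int) :
    (l.map f).sum = ∑ j ∈ Finset.range l.length, f (l.getD j 0) := by
  rw [← pv_list_sum_range]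
  congr 1
  apply List.ext_getElem
  · simp
  · intro i h1 h2
    simp only [List.getElem_map, List.getElem_range]
    rw [List.getD_eq_getElem l 0 (by simpa using h1)]

-- one step of the correction loop, pointwise
theorem pvCorr_spec (pr : PySem.Dict (Int × Int) Int) (sc : List Int) (n : Nat)
    (cnt : List Int) (hlen : cnt.length = n) (it : (Int × Int) × Int)
    (a b : Nat) (ha : a < n) (hb : b < n) (hab : it.1 = ((a : Int), (b : Int))) :
    (pvCorr pr sc cnt it).length = n ∧ ∀ k : Nat, k < n →
      (pvCorr pr sc cnt it).getD k 0 = cnt.getD k 0 + pvDelta pr sc k it := by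
  unfold pvCorr pvDelta
  rw [hab]
  simp only [PySem.List.pySetD_natCast, PySem.List.pyGetD_natCast]
  constructor
  · split_ifs <;> simp [hlen]
  · intro k hk
    by_cases hwin : it.2 > pr.getD ((b : Int), (a : Int)) 0
    · rw [if_pos hwin, if_pos hwin]
      rw [pv_getD_set _ b k _ 0 (by simp; omega), pv_getD_set cnt a b _ 0 (by omega),
          pv_getD_set cnt a k _ 0 (by omega)]
      have hca : ((a : Int) = (k : Int)) ↔ (a = k) := Nat.cast_inj
      have hcb : ((b : Int) = (k : Int)) ↔ (b = k) := Nat.cast_inj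
      by_cases hkb : k = b
      · subst hkb
        rw [if_pos rfl, if_pos (hcb.mpr rfl)]
        by_cases hka : k = a
        · subst hka
          rw [if_pos rfl, if_pos (hca.mpr rfl)]
          ring
        · rw [if_neg hka, if_neg (fun h => hka ((hca.mp h).symm))]
          ring
      · rw [if_neg hkb, if_neg (fun h => hkb ((hcb.mp h).symm))]
        by_cases hka : k = a
        · subst hka
          rw [if_pos rfl, if_pos (hca.mpr rfl)]
          ring
        · rw [if_neg hka, if_neg (fun h => hka ((hca.mp h).symm))]
          ring
    · rw [if_neg hwin, if_neg hwin]
      ring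

-- the whole correction loop, pointwise
theorem pvCorr_fold (pr : PySem.Dict (Int × Int) Int) (sc : List Int) (n : Nat)
    (K : List ((Int × Int) × Int))
    (hK : ∀ it ∈ K, ∃ a b : Nat, a < n ∧ b < n ∧ it.1 = ((a : Int), (b : Int))) :
    ∀ cnt : List Int, cnt.length = n →
      (K.foldl (pvCorr pr sc) cnt).length = n ∧
      ∀ k : Nat, k < n → (K.foldl (pvCorr pr sc) cnt).getD k 0 =
        cnt.getD k 0 + (K.map (pvDelta pr sc k)).sum := by
  induction K with
  | nil => intro cnt hlen; exact ⟨hlen, fun k _ => by simp⟩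
  | cons it t ih =>
    intro cnt hlen
    obtain ⟨a, b, ha, hb, hab⟩ := hK it (by simp)
    have hstep := pvCorr_spec pr sc n cnt hlen it a b ha hb hab
    simp only [List.foldl_cons]
    obtain ⟨hl', hp'⟩ := ih (fun it' hit' => hK it' (List.mem_cons_of_mem _ hit'))
      (pvCorr pr sc cnt it) hstep.1
    refine ⟨hl', fun k hk => ?_⟩
    rw [hp' k hk, hstep.2 k hk]
    simp only [List.map_cons, List.sum_cons]
    ring

-- sum of a key-function over the dict's keys = full double sum over [0,n)²
theorem pv_sum_keys (pr : PySem.Dict (Int × Int) Int) (n : Nat)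
    (g : Int × Int → Int) (hnd : pr.keys.Nodup)
    (hrange : ∀ key ∈ pr.keys, ∃ a b : Nat, a < n ∧ b < n ∧ key = ((a : Int), (b : Int)))
    (h0 : ∀ a b : Nat, a < n → b < n → ((a : Int), (b : Int)) ∉ pr.keys →
        g ((a : Int), (b : Int)) = 0) :
    (pr.keys.map g).sum =
      ∑ i ∈ Finset.range n, ∑ j ∈ Finset.range n, g ((i : Int), (j : Int)) := by
  rw [← List.sum_toFinset g hnd]
  have hinj : ∀ p ∈ Finset.range n ×ˢ Finset.range n, ∀ q ∈ Finset.range n ×ˢ Finset.range n,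
      (fun p : Nat × Nat => (((p.1 : Int), (p.2 : Int)))) p =
      (fun p : Nat × Nat => (((p.1 : Int), (p.2 : Int)))) q → p = q := by
    intro p _ q _ h
    simp only [Prod.mk.injEq, Nat.cast_inj] at h
    exact Prod.ext h.1 h.2
  have hsub : pr.keys.toFinset ⊆
      (Finset.range n ×ˢ Finset.range n).image (fun p : Nat × Nat => ((p.1 : Int), (p.2 : Int))) := by
    intro x hx
    obtain ⟨a, b, ha, hb, rfl⟩ := hrange x (List.mem_toFinset.mp hx)
    exact Finset.mem_image.mpr ⟨(a, b), Finset.mem_product.mpr ⟨Finset.mem_range.mpr ha, Finset.mem_range.mpr hb⟩, rfl⟩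
  rw [Finset.sum_subset hsub]
  · rw [Finset.sum_image hinj, Finset.sum_product]
  · intro x hxT hx
    obtain ⟨⟨a, b⟩, hp, rfl⟩ := Finset.mem_image.mp hxT
    obtain ⟨ha, hb⟩ := Finset.mem_product.mp hp
    exact h0 a b (Finset.mem_range.mp ha) (Finset.mem_range.mp hb)
      (fun hm => hx (List.mem_toFinset.mpr hm))

-- a double sum of a function supported on row k and column k collapses
theorem pv_double_sum (n k : Nat) (hk : k < n) (g : Int × Int → Int)
    (hvan : ∀ a b : Nat, a < n → b < n → a ≠ k → b ≠ k → g ((a : Int), (b : Int)) = 0)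
    (hkk : g ((k : Int), (k : Int)) = 0) :
    (∑ i ∈ Finset.range n, ∑ j ∈ Finset.range n, g ((i : Int), (j : Int))) =
      ∑ j ∈ Finset.range n, (g ((k : Int), (j : Int)) + g ((j : Int), (k : Int))) := by
  have hinner : ∀ i ∈ Finset.range n,
      (∑ j ∈ Finset.range n, g ((i : Int), (j : Int))) =
      (if i = k then (∑ j ∈ Finset.range n, g ((k : Int), (j : Int))) - g ((i : Int), (k : Int)) else 0)
        + g ((i : Int), (k : Int)) := by
    intro i hi
    by_cases hik : i = k
    · subst hik; rw [if_pos rfl]; ring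
    · rw [if_neg hik]
      rw [Finset.sum_eq_single_of_mem k (Finset.mem_range.mpr hk)]
      · ring
      · intro j hj hjk
        exact hvan i j (Finset.mem_range.mp hi) (Finset.mem_range.mp hj) hik hjk
  rw [Finset.sum_congr rfl hinner, Finset.sum_add_distrib, Finset.sum_ite_eq'
      (Finset.range n) k (fun i => (∑ j ∈ Finset.range n, g ((k : Int), (j : Int))) - g ((i : Int), (k : Int)))]
  rw [if_pos (Finset.mem_range.mpr hk), Finset.sum_add_distrib, hkk]
  ring

-- running max with nonnegative entries = Python max(l, default=0)
theorem pv_max_fold (l : List Int) (h : ∀ x ∈ l, 0 ≤ x) :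
    l.foldl (fun mx c => if mx < c then c else mx) 0 =
      (match PySem.List.max? l (fun x => x) with | some m => m | none => 0) := by
  have hmax : l.foldl (fun mx c => if mx < c then c else mx) 0 = l.foldl max 0 := by
    apply PySem.List.foldl_congr_mem
    intro acc x _
    rcases lt_trichotomy acc x with h1 | h1 | h1
    · rw [if_pos h1, max_eq_right h1.le]
    · rw [h1]; simp
    · rw [if_neg (by omega), max_eq_left h1.le]
  rw [hmax]
  cases l with
  | nil => simp [PySem.List.max?]
  | cons x t =>
    rw [PySem.List.max?_id_cons]
    simp only [List.foldl_cons]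
    rw [max_eq_right (h x (by simp))]

-- each pvFA term is 0 or 1
theorem pv_fa_nonneg (M : List (List Int)) (scores : List Int) (i j : Nat) :
    0 ≤ pvFA M scores i j := by
  unfold pvFA; split_ifs <;> omega

-- ===== VERDICT (by name: the statement is the Claim_ definition above) =====
theorem solution_spec : Claim_equal_solution := by
  intro friends gifts _ hPre
  simp only [Spec_solution, solution, solution_alt]
  have hvalid : ∀ g ∈ gifts, ∃ iN jN : Nat, iN < friends.length ∧ jN < friends.length ∧
      (pvPeople friends).getD (((PySem.Str.split? g " ").getD []).getD 0 "") 0 = (iN : Int) ∧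
      (pvPeople friends).getD (((PySem.Str.split? g " ").getD []).getD 1 "") 0 = (jN : Int) := by
    intro g hg
    obtain ⟨hlen2, hmem⟩ := hPre g hg
    obtain ⟨a, b, hab⟩ := List.length_eq_two.mp hlen2
    rw [hab] at hmem ⊢
    obtain ⟨iN, hiN, hia⟩ := pv_people_getD friends a (hmem a (by simp))
    obtain ⟨jN, hjN, hjb⟩ := pv_people_getD friends b (hmem b (by simp))
    exact ⟨iN, jN, hiN, hjN, hia, hjb⟩
  have hInv := pvInv_fold (pvPeople friends) friends.length gifts
      ((List.range friends.length).map fun _ => (List.range friends.length).map fun _ => (0 : Int))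
      PySem.Dict.empty (List.replicate friends.length 0)
      hvalid (pvInv_init friends.length)
  set n := friends.length with hn
  set st := gifts.foldl (pvStepB (pvPeople friends))
      (PySem.Dict.empty, List.replicate n (0 : Int)) with hst
  set M := gifts.foldl (pvStepA (pvPeople friends))
      ((List.range n).map fun _ => (List.range n).map fun _ => (0 : Int)) with hM
  obtain ⟨hlen, hrlen, hslen, hpair, hnn, hsc, hkeys, hcompl, hnd⟩ := hInv
  -- A's scores list
  rw [PySem.List.foldl_append_singleton_eq_map
      (fun i => (M.getD i []).sum -
        (List.range n).foldl (fun a j => a + (M.getD j []).getD i 0) 0),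
      List.nil_append]
  set scoresA := (List.range n).map
      (fun i => (M.getD i []).sum -
        (List.range n).foldl (fun a j => a + (M.getD j []).getD i 0) 0) with hscoresA
  have hscores : ∀ i : Nat, i < n → scoresA.getD i 0 = st.2.getD i 0 := by
    intro i hi
    rw [hscoresA, List.getD_eq_getElem _ 0 (by simpa using hi)]
    simp only [List.getElem_map, List.getElem_range]
    rw [hsc i hi]
  -- A's per-person count as a Finset sum
  have hcntA : ∀ mx : Int, ∀ i ∈ List.range n,
      (List.range n).foldl (fun c j =>
          if i = j then c
          else if (M.getD i []).getD j 0 > (M.getD j []).getD i 0 then c + 1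
          else if (M.getD i []).getD j 0 = (M.getD j []).getD i 0 then
            if scoresA.getD i 0 > scoresA.getD j 0 then c + 1 else c
          else c) 0 = ∑ j ∈ Finset.range n, pvFA M scoresA i j := by
    intro _ i _
    have hb : (List.range n).foldl (fun c j =>
          if i = j then c
          else if (M.getD i []).getD j 0 > (M.getD j []).getD i 0 then c + 1
          else if (M.getD i []).getD j 0 = (M.getD j []).getD i 0 then
            if scoresA.getD i 0 > scoresA.getD j 0 then c + 1 else c
          else c) 0 =
        (List.range n).foldl (fun c j => c + pvFA M scoresA i j) 0 := by
      apply PySem.List.foldl_congr_mem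
      intro c j _
      unfold pvFA
      split_ifs <;> omega
    rw [hb, PySem.List.foldl_add, zero_add, pv_list_sum_range]
  -- B's corrected count list, pointwise
  have hK : ∀ it ∈ st.1.items, ∃ a b : Nat, a < n ∧ b < n ∧ it.1 = ((a : Int), (b : Int)) :=
    fun it hit => hkeys it.1 (PySem.Dict.mem_keys_of_mem_items st.1 hit)
  set base := (List.range n).map (fun i =>
      (st.2.map (fun s => if s < st.2.getD i 0 then (1 : Int) else 0)).sum) with hbase
  have hbaselen : base.length = n := by simp [hbase]
  obtain ⟨hclen, hcpt⟩ := pvCorr_fold st.1 st.2 n st.1.items hK base hbaselen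
  have hgetD : ∀ k : Nat, k < n →
      (st.1.items.foldl (pvCorr st.1 st.2) base).getD k 0 =
        ∑ j ∈ Finset.range n, pvFA M scoresA k j := by
    intro k hk
    rw [hcpt k hk]
    -- the items-sum is a keys-sum
    have hitems : (st.1.items.map (pvDelta st.1 st.2 k)).sum =
        (st.1.keys.map (pvG st.1 st.2 k)).sum := by
      have h1 : ∀ it ∈ st.1.items, pvDelta st.1 st.2 k it = pvG st.1 st.2 k it.1 := by
        intro it hit
        have hval : st.1.getD it.1 0 = it.2 := PySem.Dict.getD_of_mem_items st.1 (by
          show (it.1, it.2) ∈ st.1.items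
          simpa using hit) hnd 0
        show pvDelta st.1 st.2 k it = pvDelta st.1 st.2 k (it.1, st.1.getD it.1 0)
        rw [hval]
      rw [List.map_congr_left h1, show st.1.keys = st.1.items.map (·.1) from rfl,
          List.map_map]
      rfl
    -- base entry
    have hbk : base.getD k 0 =
        ∑ j ∈ Finset.range n, (if st.2.getD j 0 < st.2.getD k 0 then (1 : Int) else 0) := by
      rw [hbase, List.getD_eq_getElem _ 0 (by simpa using hk)]
      simp only [List.getElem_map, List.getElem_range]
      rw [pv_map_sum_getD st.2 (fun s => if s < st.2.getD k 0 then (1 : Int) else 0), hslen]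
    -- keys-sum = collapsed double sum
    have hsum : (st.1.keys.map (pvG st.1 st.2 k)).sum =
        ∑ j ∈ Finset.range n,
          (pvG st.1 st.2 k ((k : Int), (j : Int)) + pvG st.1 st.2 k ((j : Int), (k : Int))) := by
      have h0 : ∀ a b : Nat, a < n → b < n → ((a : Int), (b : Int)) ∉ st.1.keys →
          pvG st.1 st.2 k ((a : Int), (b : Int)) = 0 := by
        intro a b ha hb hnotin
        have habs : st.1.getD ((a : Int), (b : Int)) 0 = 0 := by
          apply PySem.Dict.getD_of_not_contains
          rw [← Bool.not_eq_true]
          intro hc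
          exact hnotin ((PySem.Dict.contains_iff_mem_keys st.1 _).mp hc)
        have hge : 0 ≤ st.1.getD ((b : Int), (a : Int)) 0 := by
          rw [← hpair b a hb ha]
          exact hnn b a hb ha
        simp only [pvG, pvDelta, habs]
        rw [if_neg (by omega)]
      have hvan : ∀ a b : Nat, a < n → b < n → a ≠ k → b ≠ k →
          pvG st.1 st.2 k ((a : Int), (b : Int)) = 0 := by
        intro a b ha hb hak hbk2
        simp only [pvG, pvDelta]
        rw [if_neg (show ¬((a : Int) = (k : Int)) from by exact_mod_cast hak),
            if_neg (show ¬((b : Int) = (k : Int)) from by exact_mod_cast hbk2)]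
        split_ifs <;> ring
      have hkk : pvG st.1 st.2 k ((k : Int), (k : Int)) = 0 := by
        simp only [pvG, pvDelta]
        rw [if_neg (by omega)]
      rw [pv_sum_keys st.1 n _ hnd hkeys h0]
      exact pv_double_sum n k hk _ hvan hkk
    rw [hitems, hbk, hsum, ← Finset.sum_add_distrib]
    apply Finset.sum_congr rfl
    intro j hj
    have hjn := Finset.mem_range.mp hj
    unfold pvG pvDelta pvFA
    simp only [PySem.List.pyGetD_natCast]
    rw [← hpair k j hk hjn, ← hpair j k hjn hk, hscores k hk, hscores j hjn]
    by_cases hjk : j = k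
    · subst hjk
      split_ifs <;> omega
    · have hjk' : ¬((j : Int) = (k : Int)) := by exact_mod_cast hjk
      have hkj : ¬(k = j) := fun h => hjk h.symm
      split_ifs <;> omega
  -- the corrected list IS the list of A's counts
  have hclist : st.1.items.foldl (pvCorr st.1 st.2) base =
      (List.range n).map (fun i => ∑ j ∈ Finset.range n, pvFA M scoresA i j) := by
    apply List.ext_getElem
    · simp [hclen]
    · intro i h1 h2
      have hi : i < n := by simpa [hclen] using h1
      rw [← List.getD_eq_getElem _ 0 h1, ← List.getD_eq_getElem _ 0 h2, hgetD i hi,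
          List.getD_eq_getElem _ 0 h2]
      simp
  -- both ends are the same max
  have hcong : (List.range n).foldl (fun mx i =>
      if mx < (List.range n).foldl (fun c j =>
          if i = j then c
          else if (M.getD i []).getD j 0 > (M.getD j []).getD i 0 then c + 1
          else if (M.getD i []).getD j 0 = (M.getD j []).getD i 0 then
            if scoresA.getD i 0 > scoresA.getD j 0 then c + 1 else c
          else c) 0 then (List.range n).foldl (fun c j =>
          if i = j then c
          else if (M.getD i []).getD j 0 > (M.getD j []).getD i 0 then c + 1
          else if (M.getD i []).getD j 0 = (M.getD j []).getD i 0 then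
            if scoresA.getD i 0 > scoresA.getD j 0 then c + 1 else c
          else c) 0 else mx) 0 =
      (List.range n).foldl (fun mx i =>
        if mx < ∑ j ∈ Finset.range n, pvFA M scoresA i j then
          ∑ j ∈ Finset.range n, pvFA M scoresA i j else mx) 0 := by
    apply PySem.List.foldl_congr_mem
    intro mx i hi
    rw [hcntA mx i hi]
  rw [hcong, hclist, ← List.foldl_map
      (f := fun i => ∑ j ∈ Finset.range n, pvFA M scoresA i j)
      (g := fun mx c => if mx < c then c else mx)]
  exact pv_max_fold _ (by
    intro x hx
    obtain ⟨i, _, rfl⟩ := List.mem_map.mp hx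
    exact Finset.sum_nonneg (fun j _ => pv_fa_nonneg M scoresA i j))
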